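-- pv_equiv track=rewrite | github.com/millman/nes-ai | web_viewer/diffing.py | _parse_metadata_entries
-- ===== SOURCE A (Python) =====
-- from typing import Dict, Iterable, List, Tuple
--
-- def _parse_metadata_entries(metadata_text: str) -> List[Tuple[str, str, List[str]]]:
--     entries: List[Tuple[str, str, List[str]]] = []
--     section = ""
--     lines = metadata_text.splitlines()
--     i = 0
--     while i < len(lines):
--         line = lines[i]
--         stripped = line.strip()
--         if not stripped:
--             i += 1
--             continue
--         if stripped.startswith("[") and stripped.endswith("]"):
--             section = stripped[1:-1].strip()
--             i += 1
--             continue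
--         if "=" in line and line.lstrip() == line:
--             key = line.split("=", 1)[0].strip()
--             entry_lines = [line]
--             value_part = line.split("=", 1)[1]
--             bracket_balance = value_part.count("[") - value_part.count("]")
--             if bracket_balance > 0 and not value_part.strip().endswith("]"):
--                 i += 1
--                 while i < len(lines):
--                     entry_lines.append(lines[i])
--                     bracket_balance += lines[i].count("[") - lines[i].count("]")
--                     if bracket_balance <= 0 and lines[i].strip().endswith("]"):
--                         break
--                     i += 1
--             entries.append((section, key, entry_lines))
--         i += 1
--     return entries
-- ===== SOURCE B (Python) =====
-- from typing import List, Tuple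
--
-- def _parse_metadata_entries(metadata_text: str) -> List[Tuple[str, str, List[str]]]:
--     entries: List[Tuple[str, str, List[str]]] = []
--     section = ""
--     pending = None  # (key, entry_lines, bracket_balance) while inside a multi-line value
--     for line in metadata_text.splitlines():
--         if pending is not None:
--             key, entry_lines, balance = pending
--             entry_lines.append(line)
--             balance += line.count("[") - line.count("]")
--             if balance <= 0 and line.strip().endswith("]"):
--                 entries.append((section, key, entry_lines))
--                 pending = None
--             else:
--                 pending = (key, entry_lines, balance)
--             continue
--         stripped = line.strip()
--         if not stripped:
--             continue
--         if stripped.startswith("[") and stripped.endswith("]"):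
--             section = stripped[1:-1].strip()
--             continue
--         if "=" in line and line.lstrip() == line:
--             key = line.split("=", 1)[0].strip()
--             value_part = line.split("=", 1)[1]
--             balance = value_part.count("[") - value_part.count("]")
--             if balance > 0 and not value_part.strip().endswith("]"):
--                 pending = (key, [line], balance)
--             else:
--                 entries.append((section, key, [line]))
--     if pending is not None:
--         key, entry_lines, _ = pending
--         entries.append((section, key, entry_lines))
--     return entries
-- ===== Notes on version B (the rewrite author's own statement) =====
-- stated objective: simpler
-- what changed: Replaces A's index-advancing outer while with a nested inner while by one linear fold over the lines carrying an explicit pending-entry state (key, lines, bracket balance) that is flushed at end of input.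
import Mathlib
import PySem

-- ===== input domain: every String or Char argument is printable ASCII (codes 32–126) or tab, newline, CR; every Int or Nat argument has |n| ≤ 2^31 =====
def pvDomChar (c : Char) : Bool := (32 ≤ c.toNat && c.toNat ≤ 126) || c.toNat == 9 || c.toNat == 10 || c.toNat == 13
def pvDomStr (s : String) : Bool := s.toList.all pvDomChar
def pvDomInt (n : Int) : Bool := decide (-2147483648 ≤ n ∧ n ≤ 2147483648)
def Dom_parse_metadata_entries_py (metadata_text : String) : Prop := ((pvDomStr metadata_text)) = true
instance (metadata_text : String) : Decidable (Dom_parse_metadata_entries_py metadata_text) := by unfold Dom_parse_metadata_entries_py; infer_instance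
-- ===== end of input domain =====

-- B replaces A's index-advancing nested while loops by a single left fold with an
-- explicit pending-entry state (objective: simpler single-pass decomposition; same cost).

-- ===== PORT A =====
-- A's inner 'while i < len(lines)' accumulation loop: consumes lines into acc until the
-- bracket balance closes; returns (entry_lines, remaining lines after the loop).
def pvInnerA : List String → Int → List String → (List String × List String)
  | [], _, acc => (acc, [])
  | l :: rest, bal, acc =>
    let bal' := bal + ((PySem.Str.count l "[" : Int) - (PySem.Str.count l "]" : Int))
    let acc' := acc ++ [l]
    if bal' ≤ 0 ∧ PySem.Str.endswith (PySem.Str.strip l) "]" then (acc', rest)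
    else pvInnerA rest bal' acc'

-- needed by pvOuterA's termination: the inner loop never returns more lines than it got
theorem pvInnerA_len_le : ∀ (ls : List String) (bal : Int) (acc : List String),
    (pvInnerA ls bal acc).2.length ≤ ls.length := by
  intro ls
  induction ls with
  | nil => intro bal acc; simp [pvInnerA]
  | cons l rest ih =>
    intro bal acc
    simp only [pvInnerA]
    split
    · simp
    · exact le_trans (ih _ _) (Nat.le_succ _)

-- A's outer 'while i < len(lines)' loop (entries is the accumulator, sec the current section)
def pvOuterA (lines : List String) (sec : String)
    (entries : List (String × String × List String)) : List (String × String × List String) :=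
  match lines with
  | [] => entries
  | line :: rest =>
    let stripped := PySem.Str.strip line
    if stripped = "" then pvOuterA rest sec entries
    else if PySem.Str.startswith stripped "[" ∧ PySem.Str.endswith stripped "]" then
      pvOuterA rest (PySem.Str.strip (PySem.Str.slice stripped (some 1) (some (-1)))) entries
    else if PySem.Str.isIn "=" line ∧ PySem.Str.lstrip line = line then
      -- guard guarantees line.split("=",1) has two parts; [i] ported as getD
      let key := PySem.Str.strip (((PySem.Str.splitMax? line "=" 1).getD []).getD 0 "")
      let value_part := ((PySem.Str.splitMax? line "=" 1).getD []).getD 1 ""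
      let bal := (PySem.Str.count value_part "[" : Int) - (PySem.Str.count value_part "]" : Int)
      if 0 < bal ∧ ¬ PySem.Str.endswith (PySem.Str.strip value_part) "]" then
        let p := pvInnerA rest bal [line]
        pvOuterA p.2 sec (entries ++ [(sec, key, p.1)])
      else
        pvOuterA rest sec (entries ++ [(sec, key, [line])])
    else pvOuterA rest sec entries
termination_by lines.length
decreasing_by
  · simp
  · simp
  · simpa [Nat.lt_succ_iff] using pvInnerA_len_le rest _ [line]
  · simp
  · simp

def parse_metadata_entries_py (metadata_text : String) : List (String × String × List String) :=
  pvOuterA (PySem.Str.splitlines metadata_text) "" []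

-- ===== PORT B =====
-- B's state: (entries so far, current section, pending multi-line entry (key, lines, balance))
def pvStepB (st : List (String × String × List String) × String × Option (String × List String × Int))
    (line : String) :
    List (String × String × List String) × String × Option (String × List String × Int) :=
  match st.2.2 with
  | some (key, el, bal) =>
    let el' := el ++ [line]
    let bal' := bal + ((PySem.Str.count line "[" : Int) - (PySem.Str.count line "]" : Int))
    if bal' ≤ 0 ∧ PySem.Str.endswith (PySem.Str.strip line) "]" then
      (st.1 ++ [(st.2.1, key, el')], st.2.1, none)
    else (st.1, st.2.1, some (key, el', bal'))
  | none =>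
    let stripped := PySem.Str.strip line
    if stripped = "" then st
    else if PySem.Str.startswith stripped "[" ∧ PySem.Str.endswith stripped "]" then
      (st.1, PySem.Str.strip (PySem.Str.slice stripped (some 1) (some (-1))), none)
    else if PySem.Str.isIn "=" line ∧ PySem.Str.lstrip line = line then
      let key := PySem.Str.strip (((PySem.Str.splitMax? line "=" 1).getD []).getD 0 "")
      let value_part := ((PySem.Str.splitMax? line "=" 1).getD []).getD 1 ""
      let bal := (PySem.Str.count value_part "[" : Int) - (PySem.Str.count value_part "]" : Int)
      if 0 < bal ∧ ¬ PySem.Str.endswith (PySem.Str.strip value_part) "]" then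
        (st.1, st.2.1, some (key, [line], bal))
      else (st.1 ++ [(st.2.1, key, [line])], st.2.1, none)
    else st

-- final flush of a still-open pending entry
def pvFlushB (st : List (String × String × List String) × String × Option (String × List String × Int)) :
    List (String × String × List String) :=
  match st.2.2 with
  | some (key, el, _) => st.1 ++ [(st.2.1, key, el)]
  | none => st.1

def parse_metadata_entries_py_alt (metadata_text : String) : List (String × String × List String) :=
  pvFlushB ((PySem.Str.splitlines metadata_text).foldl pvStepB ([], "", none))

-- ===== PRECONDITION & SPEC =====
def Spec_parse_metadata_entries_py (metadata_text : String) (out : List (String × String × List String)) : Prop := out = parse_metadata_entries_py_alt metadata_text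
instance (metadata_text : String) (out : List (String × String × List String)) : Decidable (Spec_parse_metadata_entries_py metadata_text out) := by unfold Spec_parse_metadata_entries_py; infer_instance

-- ===== CLAIM (what is proved, stated in full; the proofs are below) =====
def Claim_equal_parse_metadata_entries_py : Prop := ∀ (metadata_text : String), Dom_parse_metadata_entries_py metadata_text → Spec_parse_metadata_entries_py metadata_text (parse_metadata_entries_py metadata_text)

-- ===== LEMMAS AND PROOFS =====
-- Invariant: B's fold-with-state, flushed, computes A's two nested loops.
theorem pvFold_eq : ∀ (lines : List String) (entries : List (String × String × List String))
    (sec : String) (pending : Option (String × List String × Int)),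
    pvFlushB (lines.foldl pvStepB (entries, sec, pending)) =
      (match pending with
       | none => pvOuterA lines sec entries
       | some (key, el, bal) =>
         let p := pvInnerA lines bal el
         pvOuterA p.2 sec (entries ++ [(sec, key, p.1)])) := by
  intro lines
  induction lines with
  | nil =>
    intro entries sec pending
    cases pending with
    | none => simp [pvFlushB, pvOuterA]
    | some p => obtain ⟨key, el, bal⟩ := p; simp [pvFlushB, pvInnerA, pvOuterA]
  | cons line rest ih =>
    intro entries sec pending
    cases pending with
    | some p =>
      obtain ⟨key, el, bal⟩ := p
      simp only [List.foldl_cons, pvStepB, pvInnerA]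
      split
      · rw [ih]
      · rw [ih]
    | none =>
      simp only [List.foldl_cons, pvStepB]
      by_cases h1 : PySem.Str.strip line = ""
      · simp only [if_pos h1, ih, pvOuterA]
      · simp only [if_neg h1]
        by_cases h2 : PySem.Str.startswith (PySem.Str.strip line) "[" ∧
            PySem.Str.endswith (PySem.Str.strip line) "]"
        · simp only [if_pos h2, ih, pvOuterA, if_neg h1]
        · simp only [if_neg h2]
          by_cases h3 : PySem.Str.isIn "=" line = true ∧ PySem.Str.lstrip line = line
          · simp only [if_pos h3]
            by_cases h4 : 0 < (PySem.Str.count (((PySem.Str.splitMax? line "=" 1).getD []).getD 1 "") "[" : Int) -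
                (PySem.Str.count (((PySem.Str.splitMax? line "=" 1).getD []).getD 1 "") "]" : Int) ∧
                ¬ PySem.Str.endswith (PySem.Str.strip (((PySem.Str.splitMax? line "=" 1).getD []).getD 1 "")) "]"
            · simp only [if_pos h4, ih]
              conv_rhs => rw [pvOuterA]
              simp only [if_neg h1, if_neg h2, if_pos h3, if_pos h4]
            · simp only [if_neg h4, ih]
              conv_rhs => rw [pvOuterA]
              simp only [if_neg h1, if_neg h2, if_pos h3, if_neg h4]
          · simp only [if_neg h3, ih]
            conv_rhs => rw [pvOuterA]
            simp only [if_neg h1, if_neg h2, if_neg h3]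

-- ===== VERDICT (by name: the statement is the Claim_ definition above) =====
theorem parse_metadata_entries_py_spec : Claim_equal_parse_metadata_entries_py := by
  intro metadata_text _
  unfold Spec_parse_metadata_entries_py parse_metadata_entries_py parse_metadata_entries_py_alt
  rw [pvFold_eq]
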